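-- pv_equiv track=rewrite | github.com/sOR-o/Voice-Activity-Detection | helper/vad.py | extract_speech_segments
-- ===== SOURCE A (Python) =====
-- def extract_speech_segments(actual):
--     segments = []
--     in_speech = False
--     start_index = None
--
--     for i, value in enumerate(actual):
--         if value == 1:
--             if not in_speech:
--                 start_index = i
--                 in_speech = True
--         else:
--             if in_speech:
--                 segments.append((start_index, i - 1))
--                 in_speech = False
--
--     if in_speech:
--         segments.append((start_index, len(actual) - 1))
--
--     return segments
-- ===== SOURCE B (Python) =====
-- from itertools import groupby
--
-- def extract_speech_segments(actual):
--     segments = []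
--     index = 0
--     for is_speech, group in groupby(actual, key=lambda v: v == 1):
--         length = sum(1 for _ in group)
--         if is_speech:
--             segments.append((index, index + length - 1))
--         index += length
--     return segments
-- ===== Notes on version B (the rewrite author's own statement) =====
-- stated objective: simpler
-- what changed: Replaces the in_speech/start_index state machine with itertools.groupby over consecutive runs, appending one segment per speech run while advancing a running index.
import Mathlib
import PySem

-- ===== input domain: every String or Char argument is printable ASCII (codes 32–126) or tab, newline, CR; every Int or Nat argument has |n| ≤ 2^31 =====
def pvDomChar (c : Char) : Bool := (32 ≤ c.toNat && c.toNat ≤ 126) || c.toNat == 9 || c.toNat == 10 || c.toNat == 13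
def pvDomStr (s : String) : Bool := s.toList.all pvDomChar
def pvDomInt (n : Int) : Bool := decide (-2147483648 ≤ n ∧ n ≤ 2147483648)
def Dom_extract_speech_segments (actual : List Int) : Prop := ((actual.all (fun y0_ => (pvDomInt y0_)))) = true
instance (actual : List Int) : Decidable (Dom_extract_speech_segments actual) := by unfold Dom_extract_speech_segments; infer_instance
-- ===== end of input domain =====

-- B replaces A's in_speech/start_index state machine with run-grouping (itertools.groupby):
-- one segment per maximal run of 1s, a running index advanced by each run's length (simpler decomposition).


-- ===== PORT A =====
-- A's for-loop over enumerate(actual), carrying (segments, in_speech, start_index)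
def pvLoopA (l : List Int) (i : Int) (segs : List (Int × Int)) (insp : Bool)
    (si : Option Int) : List (Int × Int) × Bool × Option Int :=
  match l with
  | [] => (segs, insp, si)
  | v :: rest =>
    if v == 1 then
      if !insp then pvLoopA rest (i + 1) segs true (some i)
      else pvLoopA rest (i + 1) segs insp si
    else
      if insp then pvLoopA rest (i + 1) (segs ++ [(si.getD 0, i - 1)]) false si
      else pvLoopA rest (i + 1) segs insp si

def extract_speech_segments (actual : List Int) : List (Int × Int) :=
  match pvLoopA actual 0 [] false none with
  | (segs, insp, si) =>
    if insp then segs ++ [(si.getD 0, (actual.length : Int) - 1)] else segs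

-- ===== PORT B =====
-- B's groupby loop: each call consumes one maximal run of equal key (v == 1),
-- appends a segment if the run is speech, and advances the running index by the run length.
def pvRunsB (l : List Int) (index : Int) : List (Int × Int) :=
  match l with
  | [] => []
  | v :: rest =>
    let is_speech := v == 1
    let run := rest.takeWhile (fun w => (w == 1) == is_speech)
    let rest' := rest.dropWhile (fun w => (w == 1) == is_speech)
    let length : Int := 1 + run.length
    if is_speech then (index, index + length - 1) :: pvRunsB rest' (index + length)
    else pvRunsB rest' (index + length)
termination_by l.length
decreasing_by
  all_goals
    simp only [List.length_cons]
    exact Nat.lt_succ_of_le (List.length_dropWhile_le _ _)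

def extract_speech_segments_alt (actual : List Int) : List (Int × Int) :=
  pvRunsB actual 0

-- ===== PRECONDITION & SPEC =====
def Spec_extract_speech_segments (actual : List Int) (out : List (Int × Int)) : Prop := out = extract_speech_segments_alt actual
instance (actual : List Int) (out : List (Int × Int)) : Decidable (Spec_extract_speech_segments actual out) := by unfold Spec_extract_speech_segments; infer_instance

-- ===== CLAIM (what is proved, stated in full; the proofs are below) =====
def Claim_equal_extract_speech_segments : Prop := ∀ (actual : List Int), Dom_extract_speech_segments actual → Spec_extract_speech_segments actual (extract_speech_segments actual)

-- ===== LEMMAS AND PROOFS =====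

-- finishing step of A: the trailing append when the loop ends while in speech
def pvFinish (st : List (Int × Int) × Bool × Option Int) (endIdx : Int) : List (Int × Int) :=
  match st with
  | (segs, insp, si) => if insp then segs ++ [(si.getD 0, endIdx - 1)] else segs

-- peeling a non-speech element does not change B's output
theorem pvRunsB_ne (v : Int) (rest : List Int) (i : Int) (hv : (v == 1) = false) :
    pvRunsB (v :: rest) i = pvRunsB rest (i + 1) := by
  match rest with
  | [] => simp [pvRunsB, hv]
  | w :: rs =>
    by_cases hw : (w == 1) = true
    · simp [pvRunsB, hv, hw, List.takeWhile, List.dropWhile]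
    · simp only [Bool.not_eq_true] at hw
      simp only [pvRunsB, hv, hw, List.takeWhile_cons, List.dropWhile_cons, beq_self_eq_true,
        if_pos, Bool.false_eq_true, if_neg, not_false_iff, List.length_cons]
      congr 1
      push_cast
      ring

-- the joint loop invariant: A's loop (finished at index i + l.length) produces segs ++ B's runs,
-- both from the idle state and from the in-speech state with pending start s
theorem pvMain (l : List Int) :
    (∀ (i : Int) (segs : List (Int × Int)) (si : Option Int),
       pvFinish (pvLoopA l i segs false si) (i + l.length) = segs ++ pvRunsB l i) ∧
    (∀ (i : Int) (segs : List (Int × Int)) (s : Int),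
       pvFinish (pvLoopA l i segs true (some s)) (i + l.length)
         = segs ++ (s, i + ((l.takeWhile (fun w => w == 1)).length : Int) - 1)
             :: pvRunsB (l.dropWhile (fun w => w == 1)) (i + ((l.takeWhile (fun w => w == 1)).length : Int))) := by
  induction l with
  | nil => constructor <;> intros <;> simp [pvLoopA, pvFinish, pvRunsB]
  | cons v rest ih =>
    obtain ⟨ih1, ih2⟩ := ih
    constructor
    · intro i segs si
      by_cases hv : (v == 1) = true
      · simp only [pvLoopA, hv, if_pos, Bool.not_false]
        rw [show (i + (((v :: rest).length : Nat) : Int)) = (i + 1) + rest.length by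
          simp only [List.length_cons]; push_cast; ring]
        rw [ih2 (i + 1) segs i]
        have : pvRunsB (v :: rest) i
            = (i, i + (1 + ((rest.takeWhile (fun w => (w == 1) == true)).length : Int)) - 1)
              :: pvRunsB (rest.dropWhile (fun w => (w == 1) == true))
                   (i + (1 + ((rest.takeWhile (fun w => (w == 1) == true)).length : Int))) := by
          rw [pvRunsB]
          simp [hv]
        rw [this]
        have ht : rest.takeWhile (fun w => (w == 1) == true) = rest.takeWhile (fun w => w == 1) := by
          simp
        have hd : rest.dropWhile (fun w => (w == 1) == true) = rest.dropWhile (fun w => w == 1) := by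
          simp
        rw [ht, hd]
        congr 2
        · congr 1
          · ring
        · ring
      · simp only [Bool.not_eq_true] at hv
        simp only [pvLoopA, hv, Bool.false_eq_true, if_neg, not_false_iff,
          List.length_cons]
        rw [pvRunsB_ne v rest i hv]
        rw [show (i + (((rest.length : Nat) + 1 : Nat) : Int)) = (i + 1) + rest.length by push_cast; ring]
        exact ih1 (i + 1) segs si
    · intro i segs s
      by_cases hv : (v == 1) = true
      · simp only [pvLoopA, hv, if_pos, Bool.not_true, Bool.false_eq_true, if_neg, not_false_iff,
          List.length_cons]
        rw [show (i + (((rest.length : Nat) + 1 : Nat) : Int)) = (i + 1) + rest.length by push_cast; ring]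
        rw [ih2 (i + 1) segs s]
        simp only [List.takeWhile, List.dropWhile, hv, List.length_cons]
        congr 3
        · push_cast; ring
        · push_cast; ring
      · simp only [Bool.not_eq_true] at hv
        simp only [pvLoopA, hv, Bool.false_eq_true, if_neg, not_false_iff, if_pos,
          List.length_cons]
        rw [show (i + (((rest.length : Nat) + 1 : Nat) : Int)) = (i + 1) + rest.length by push_cast; ring]
        simp only [Option.getD_some]
        rw [ih1 (i + 1) (segs ++ [(s, i - 1)]) (some s)]
        simp only [List.takeWhile, List.dropWhile, hv, List.length_nil, Nat.cast_zero, add_zero]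
        rw [pvRunsB_ne v rest i hv]
        simp

-- ===== VERDICT (by name: the statement is the Claim_ definition above) =====
theorem extract_speech_segments_spec : Claim_equal_extract_speech_segments := by
  intro actual _
  unfold Spec_extract_speech_segments extract_speech_segments extract_speech_segments_alt
  have h := (pvMain actual).1 0 [] none
  simp only [zero_add] at h
  rcases hst : pvLoopA actual 0 [] false none with ⟨segs, insp, si⟩
  rw [hst] at h
  simp only [pvFinish, List.nil_append] at h
  exact h
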